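-- pv_equiv track=rewrite | github.com/mattias05/Baccarat_simulator | baccarat-sim.py | hand_values
-- ===== SOURCE A (Python) =====
-- def hand_values(hand):
--     """Creates a list of strings with the values of a hand."""
--     values = []
--     for i in range(3):
--         try:
--             values.append(str(hand[i]))
--         except IndexError:
--             values.append('x')
--     return values
-- ===== SOURCE B (Python) =====
-- def hand_values(hand):
--     """Creates a list of strings with the values of a hand."""
--     firsts = [str(v) for v in hand[:3]]
--     return firsts + ['x'] * (3 - len(firsts))
-- ===== Notes on version B (the rewrite author's own statement) =====
-- stated objective: simpler
-- what changed: Replaces the per-index try/except IndexError loop with a slice of the first three elements mapped to str, padded with 'x' to length 3.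
import Mathlib
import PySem

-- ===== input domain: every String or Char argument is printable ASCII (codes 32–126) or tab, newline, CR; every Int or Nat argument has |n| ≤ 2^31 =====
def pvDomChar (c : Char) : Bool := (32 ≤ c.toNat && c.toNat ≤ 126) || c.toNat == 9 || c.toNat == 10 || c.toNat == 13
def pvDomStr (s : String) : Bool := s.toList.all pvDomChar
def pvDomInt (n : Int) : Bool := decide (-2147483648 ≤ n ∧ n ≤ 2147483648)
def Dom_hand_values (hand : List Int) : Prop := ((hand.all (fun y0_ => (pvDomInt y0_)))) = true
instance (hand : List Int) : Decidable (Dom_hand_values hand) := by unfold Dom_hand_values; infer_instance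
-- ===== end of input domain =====

-- B replaces the per-index try/except loop with slice-map-pad (simpler decomposition).


-- ===== PORT A =====
def hand_values (hand : List Int) : List String :=
  (PySem.List.pyRange 0 3 1).foldl (fun values i =>
    match PySem.List.pyGet? hand i with
    | some v => values ++ [PySem.Int.toStr v]
    | none => values ++ ["x"]) []

-- ===== PORT B =====
def hand_values_alt (hand : List Int) : List String :=
  let firsts := (PySem.List.slice hand (some 0) (some 3)).map PySem.Int.toStr
  firsts ++ List.replicate (3 - firsts.length) "x"

-- ===== PRECONDITION & SPEC =====
def Spec_hand_values (hand : List Int) (out : List String) : Prop := out = hand_values_alt hand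
instance (hand : List Int) (out : List String) : Decidable (Spec_hand_values hand out) := by unfold Spec_hand_values; infer_instance

-- ===== CLAIM (what is proved, stated in full; the proofs are below) =====
def Claim_equal_hand_values : Prop := ∀ (hand : List Int), Dom_hand_values hand → Spec_hand_values hand (hand_values hand)

-- ===== LEMMAS AND PROOFS =====

-- ===== VERDICT (by name: the statement is the Claim_ definition above) =====
theorem hand_values_spec : Claim_equal_hand_values := by
  intro hand _
  unfold Spec_hand_values hand_values hand_values_alt
  match hand with
  | [] => decide
  | [a] => simp [show PySem.List.pyRange 0 3 1 = [0, 1, 2] from by decide, List.foldl, PySem.List.pyGet?, PySem.List.pyIdx?, PySem.List.slice]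
  | [a, b] => simp [show PySem.List.pyRange 0 3 1 = [0, 1, 2] from by decide, List.foldl, PySem.List.pyGet?, PySem.List.pyIdx?, PySem.List.slice]
  | a :: b :: c :: rest =>
      simp [show PySem.List.pyRange 0 3 1 = [0, 1, 2] from by decide, List.foldl,
        PySem.List.pyGet?, PySem.List.pyIdx?, PySem.List.slice,
        show ((2 : Int) ≤ (rest.length : Int) + 1 + 1) from by omega,
        show ((0 : Int) ≤ (rest.length : Int) + 1) from by omega,
        show ((0 : Int) ≤ (rest.length : Int) + 1 + 1) from by omega]
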